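-- pv_equiv track=rewrite | github.com/kitzeslab/opensoundscape | opensoundscape/signal_processing.py | _get_ones_sequences
-- ===== SOURCE A (Python) =====
-- def _get_ones_sequences(x):
--     """Find lengths and positions of contiguous 1s in vector of 0s & 1s"""
--     starts = []
--     lengths = []
--     seq_len = 0
--     for i, xi in enumerate(x):
--         assert xi in [0, 1], "values must be 0 or 1"
--         if xi == 0:
--             if seq_len > 0:
--                 lengths.append(seq_len)
--             seq_len = 0
--         else:
--             if seq_len == 0:
--                 starts.append(i)
--             seq_len += 1
--     if seq_len > 0:
--         lengths.append(seq_len)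
--     return starts, lengths
-- ===== SOURCE B (Python) =====
-- def _get_ones_sequences(x):
--     """Find lengths and positions of contiguous 1s in vector of 0s & 1s"""
--     starts = []
--     lengths = []
--     pos = 0
--     n = len(x)
--     while pos < n:
--         key = x[pos]
--         assert key in [0, 1], "values must be 0 or 1"
--         j = pos + 1
--         while j < n and x[j] == key:
--             j += 1
--         if key == 1:
--             starts.append(pos)
--             lengths.append(j - pos)
--         pos = j
--     return starts, lengths
-- ===== Notes on version B (the rewrite author's own statement) =====
-- stated objective: alternative
-- what changed: Replaced the per-element seq_len state machine with a run-based pass: scan each maximal run of equal values at once and record (start, length) when the run's value is 1.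
import Mathlib
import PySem

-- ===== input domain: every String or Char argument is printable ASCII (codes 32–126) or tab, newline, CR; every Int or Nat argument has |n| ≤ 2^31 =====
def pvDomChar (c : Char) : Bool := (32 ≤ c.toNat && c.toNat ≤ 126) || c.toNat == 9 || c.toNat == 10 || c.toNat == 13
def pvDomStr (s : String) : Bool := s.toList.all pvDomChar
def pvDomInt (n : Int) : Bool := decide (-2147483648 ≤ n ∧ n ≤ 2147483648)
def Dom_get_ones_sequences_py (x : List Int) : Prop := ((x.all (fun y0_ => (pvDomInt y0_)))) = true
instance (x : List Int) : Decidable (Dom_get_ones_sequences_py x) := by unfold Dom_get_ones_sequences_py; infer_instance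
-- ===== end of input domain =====

-- B replaces A's per-element seq_len state machine by a run-at-a-time scan; equivalence is proved
-- on Pre_ (all values 0 or 1), exactly where the Python A returns instead of raising AssertionError.

-- ===== PORT A =====
-- loop state: (i, starts, lengths, seq_len); the assert never fires inside Pre_ (excluded inputs raise in Python).
def goA : List Int → Int → List Int → List Int → Int → List Int × List Int
  | [], _, s, l, seq => if 0 < seq then (s, l ++ [seq]) else (s, l)
  | xi :: rest, i, s, l, seq =>
      if xi = 0 then
        goA rest (i + 1) s (if 0 < seq then l ++ [seq] else l) 0
      else
        goA rest (i + 1) (if seq = 0 then s ++ [i] else s) l (seq + 1)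

def get_ones_sequences_py (x : List Int) : List Int × List Int := goA x 0 [] [] 0

-- ===== PORT B =====
-- inner while loop of Source B: count of leading elements equal to key (beyond the first), and the rest
def runFrom (key : Int) : List Int → Int × List Int
  | [] => (0, [])
  | a :: t => if a = key then ((runFrom key t).1 + 1, (runFrom key t).2) else (0, a :: t)

theorem runFrom_len (key : Int) (t : List Int) : (runFrom key t).2.length ≤ t.length := by
  induction t with
  | nil => simp [runFrom]
  | cons a t ih =>
      by_cases h : a = key
      · simp only [runFrom, if_pos h, List.length_cons]
        omega
      · simp [runFrom, h]

-- outer while loop of Source B: one maximal run per iteration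
def goB : List Int → Int → List Int → List Int → List Int × List Int
  | [], _, s, l => (s, l)
  | key :: t, pos, s, l =>
      let p := runFrom key t
      if key = 1 then goB p.2 (pos + p.1 + 1) (s ++ [pos]) (l ++ [p.1 + 1])
      else goB p.2 (pos + p.1 + 1) s l
termination_by x => x.length
decreasing_by all_goals simpa [Nat.lt_succ_iff] using runFrom_len key t

def get_ones_sequences_py_alt (x : List Int) : List Int × List Int := goB x 0 [] []

-- ===== PRECONDITION & SPEC =====
-- Pre_ excludes exactly the inputs containing a value other than 0 or 1, on which A raises AssertionError.
def Pre_get_ones_sequences_py (x : List Int) : Prop := ∀ v ∈ x, v = 0 ∨ v = 1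
instance (x : List Int) : Decidable (Pre_get_ones_sequences_py x) := by unfold Pre_get_ones_sequences_py; infer_instance

def pvWitness_get_ones_sequences_py : List Int := [1, 1, 0, 0, 1, 0, 1, 1, 1]

def Spec_get_ones_sequences_py (x : List Int) (out : List Int × List Int) : Prop := out = get_ones_sequences_py_alt x
instance (x : List Int) (out : List Int × List Int) : Decidable (Spec_get_ones_sequences_py x out) := by unfold Spec_get_ones_sequences_py; infer_instance

-- ===== CLAIM (what is proved, stated in full; the proofs are below) =====
def Claim_equal_get_ones_sequences_py : Prop := ∀ (x : List Int), Dom_get_ones_sequences_py x → Pre_get_ones_sequences_py x → Spec_get_ones_sequences_py x (get_ones_sequences_py x)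

-- ===== LEMMAS AND PROOFS =====

-- skipping a 0-run wholesale equals skipping its first 0 and continuing
theorem goB_zero_skip (t : List Int) (i : Int) (s l : List Int) :
    goB (0 :: t) i s l = goB t (i + 1) s l := by
  cases t with
  | nil => simp [goB, runFrom]
  | cons b t' =>
      by_cases hb : b = 0
      · subst hb
        show goB (0 :: 0 :: t') i s l = goB (0 :: t') (i + 1) s l
        simp only [goB, runFrom]
        norm_num
        ring_nf
      · conv_lhs => rw [goB.eq_def]
        simp only [runFrom, if_neg hb]
        norm_num

-- the main invariant: A's state machine agrees with B's run scan, with a pending 1-run of length seq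
theorem goA_eq_goB (x : List Int) : ∀ (i : Int) (s l : List Int) (seq : Int),
    (∀ v ∈ x, v = 0 ∨ v = 1) → 0 ≤ seq →
    goA x i s l seq =
      (if seq = 0 then goB x i s l
       else
         match x with
         | [] => (s, l ++ [seq])
         | a :: t =>
             if a = 1 then
               goB (runFrom 1 t).2 (i + (runFrom 1 t).1 + 1) s (l ++ [seq + (runFrom 1 t).1 + 1])
             else goB (a :: t) i s (l ++ [seq])) := by
  induction x with
  | nil =>
      intro i s l seq _ hseq
      simp only [goA, goB]
      split_ifs with h1 h2 <;> first | rfl | omega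
  | cons a t ih =>
      intro i s l seq hmem hseq
      have ha := hmem a (by simp)
      have hmt : ∀ v ∈ t, v = 0 ∨ v = 1 := fun v hv => hmem v (by simp [hv])
      rcases ha with ha | ha <;> subst ha
      · -- a = 0
        simp only [goA]
        rw [ih (i + 1) s (if 0 < seq then l ++ [seq] else l) 0 hmt le_rfl]
        by_cases h0 : seq = 0
        · simp [h0, goB_zero_skip]
        · have : 0 < seq := by omega
          simp only [if_pos this, if_neg h0, goB_zero_skip]
          norm_num
      · -- a = 1
        simp only [goA]
        norm_num
        rw [ih (i + 1) (if seq = 0 then s ++ [i] else s) l (seq + 1) hmt (by omega)]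
        have hne : seq + 1 ≠ 0 := by omega
        simp only [if_neg hne]
        by_cases h0 : seq = 0
        · subst h0
          cases t with
          | nil => simp [goB, runFrom]
          | cons b t' =>
              by_cases hb : b = 1
              · subst hb
                show _ = goB (1 :: 1 :: t') i s l
                simp only [goB, runFrom]
                norm_num
                ring_nf
              · conv_rhs => rw [goB.eq_def]
                simp only [runFrom, if_neg hb]
                norm_num
        · -- seq ≠ 0
          simp only [if_neg h0]
          cases t with
          | nil => simp [goB, runFrom]
          | cons b t' =>
              by_cases hb : b = 1
              · subst hb
                simp only [runFrom]
                norm_num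
                ring_nf
              · simp only [runFrom, if_neg hb]
                norm_num

theorem get_ones_sequences_py_spec' (x : List Int) (h : ∀ v ∈ x, v = 0 ∨ v = 1) :
    get_ones_sequences_py x = get_ones_sequences_py_alt x := by
  have := goA_eq_goB x 0 [] [] 0 h le_rfl
  simpa [get_ones_sequences_py, get_ones_sequences_py_alt] using this

-- ===== VERDICT (by name: the statement is the Claim_ definition above) =====
theorem get_ones_sequences_py_spec : Claim_equal_get_ones_sequences_py := by
  intro x _ hpre
  exact get_ones_sequences_py_spec' x hpre
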